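-- pv_equiv track=rewrite | github.com/maniktyagi04/leetcode_repo | 1628-count-submatrices-with-all-ones/1628-count-submatrices-with-all-ones.py | rowcount
-- ===== SOURCE A (Python) =====
-- from typing import List
--
-- def rowcount(hghs: List[int]) -> int:
--     lst = []
--     sum01 = [0] * len(hghs)
--
--     for i, h in enumerate(hghs):
--         while lst and hghs[lst[-1]] >= h:
--             lst.pop()
--
--         if lst:
--             left = lst[-1]
--             sum01[i] = sum01[left] + h * (i-left)
--         else:
--             sum01[i] = h * (i+1)
--
--         lst.append(i)
--
--     return sum(sum01)
-- ===== SOURCE B (Python) =====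
-- from typing import List
--
-- def rowcount(hghs: List[int]) -> int:
--     total = 0
--     for i in range(len(hghs)):
--         mn = hghs[i]
--         total += mn
--         for j in range(i - 1, -1, -1):
--             mn = min(mn, hghs[j])
--             total += mn
--     return total
-- ===== Notes on version B (the rewrite author's own statement) =====
-- stated objective: simpler
-- what changed: Replaced the monotonic-stack DP over a sum01 array with a plain two-loop scan that keeps a running minimum per right endpoint and a single running total.
import Mathlib
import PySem

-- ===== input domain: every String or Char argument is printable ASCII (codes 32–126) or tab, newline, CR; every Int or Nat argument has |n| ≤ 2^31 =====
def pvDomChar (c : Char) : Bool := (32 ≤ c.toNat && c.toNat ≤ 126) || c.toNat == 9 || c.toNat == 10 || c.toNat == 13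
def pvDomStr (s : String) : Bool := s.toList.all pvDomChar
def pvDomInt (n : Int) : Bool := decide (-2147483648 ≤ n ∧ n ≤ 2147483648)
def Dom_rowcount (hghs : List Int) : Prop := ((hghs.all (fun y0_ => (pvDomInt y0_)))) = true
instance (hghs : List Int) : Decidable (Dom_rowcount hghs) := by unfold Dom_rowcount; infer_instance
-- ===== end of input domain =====

-- B replaces A's monotonic-stack DP with a plain two-loop scan keeping a running minimum
-- per right endpoint and a single running total (objective: simpler).

-- ===== PORT A =====
-- the `while lst and hghs[lst[-1]] >= h: lst.pop()` loop; stack head = Python's lst[-1].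
def rcPop (hg : Nat → Int) (h : Int) : List Nat → List Nat
  | [] => []
  | k :: rest => if h ≤ hg k then rcPop hg h rest else k :: rest

-- one iteration of A's `for i, h in enumerate(hghs)` loop; sum01 kept as the list of
-- entries written so far (Python writes sum01[i] in order i = 0,1,…; reads sum01[left]
-- with left < i are always already written, and indices are always in range, so getD is exact).
def rcStep (hg : Nat → Int) (st : List Nat × List Int) (i : Nat) : List Nat × List Int :=
  let h := hg i
  let l' := rcPop hg h st.1
  let s :=
    match l' with
    | [] => st.2 ++ [h * ((i : Int) + 1)]
    | left :: _ => st.2 ++ [st.2.getD left 0 + h * ((i : Int) - (left : Int))]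
  (i :: l', s)

def rowcount (hghs : List Int) : Int :=
  ((List.range hghs.length).foldl (rcStep (fun k => hghs.getD k 0)) ([], [])).2.sum

-- ===== PORT B =====
-- total accumulated across both loops; inner loop j = i-1, …, 0 carries (total, mn).
def rowcount_alt (hghs : List Int) : Int :=
  (List.range hghs.length).foldl
    (fun total i =>
      let mn := hghs.getD i 0
      (((List.range i).reverse).foldl
        (fun (p : Int × Int) j =>
          let m := min p.2 (hghs.getD j 0)
          (p.1 + m, m))
        (total + mn, mn)).1)
    0

-- ===== PRECONDITION & SPEC =====
def Spec_rowcount (hghs : List Int) (out : Int) : Prop := out = rowcount_alt hghs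
instance (hghs : List Int) (out : Int) : Decidable (Spec_rowcount hghs out) := by unfold Spec_rowcount; infer_instance

-- ===== CLAIM (what is proved, stated in full; the proofs are below) =====
def Claim_equal_rowcount : Prop := ∀ (hghs : List Int), Dom_rowcount hghs → Spec_rowcount hghs (rowcount hghs)

-- ===== LEMMAS AND PROOFS =====

-- min of m and hg over the index window [j, k-1]
def wmin (hg : Nat → Int) (m : Int) (j k : Nat) : Int :=
  (List.range' j (k - j)).foldr (fun t a => min (hg t) a) m

-- min of hg over the window [j, i]  (for j ≤ i)
def rmin (hg : Nat → Int) (i j : Nat) : Int := wmin hg (hg i) j i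

-- Σ_{j=0}^{i} min hg[j..i]  — the per-row count of submatrices ending at column i
def Sfun (hg : Nat → Int) (i : Nat) : Int :=
  ((List.range (i + 1)).map (rmin hg i)).sum

-- A's monotonic stack after processing the first i indices, in closed form
def stk (hg : Nat → Int) (i : Nat) : List Nat :=
  ((List.range i).filter (fun k => decide (∀ m, m < i → k < m → hg k < hg m))).reverse

theorem rmin_self (hg : Nat → Int) (i : Nat) : rmin hg i i = hg i := by
  simp [rmin, wmin]

theorem rmin_lt (hg : Nat → Int) {i j : Nat} (h : j < i) :
    rmin hg i j = min (hg j) (rmin hg i (j + 1)) := by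
  unfold rmin wmin
  rw [show i - j = (i - (j + 1)) + 1 by omega, List.range'_succ]
  rfl

theorem wmin_snoc (hg : Nat → Int) (m : Int) {j k : Nat} (h : j ≤ k) :
    wmin hg m j (k + 1) = wmin hg (min m (hg k)) j k := by
  unfold wmin
  rw [show k + 1 - j = (k - j) + 1 by omega, List.range'_concat,
    List.foldr_append, show j + 1 * (k - j) = k by omega]
  simp [min_comm]

theorem mem_stk (hg : Nat → Int) {i k : Nat} :
    k ∈ stk hg i ↔ k < i ∧ ∀ m, m < i → k < m → hg k < hg m := by
  simp [stk, List.mem_filter]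

theorem stk_pairwise_gt (hg : Nat → Int) (i : Nat) : (stk hg i).Pairwise (· > ·) := by
  unfold stk
  rw [List.pairwise_reverse]
  exact (List.pairwise_lt_range).filter _

theorem stk_pairwise_hg (hg : Nat → Int) (i : Nat) :
    (stk hg i).Pairwise (fun a b => hg b < hg a) := by
  refine (List.Pairwise.and_mem.1 (stk_pairwise_gt hg i)).imp ?_
  rintro a b ⟨ha, hb, hab⟩
  rcases (mem_stk hg).1 ha with ⟨hai, _⟩
  rcases (mem_stk hg).1 hb with ⟨_, hPb⟩
  exact hPb a hai hab

theorem pop_eq_filter (hg : Nat → Int) (v : Int) :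
    ∀ l : List Nat, l.Pairwise (fun a b => hg b < hg a) →
      rcPop hg v l = l.filter (fun k => decide (hg k < v)) := by
  intro l hl
  induction l with
  | nil => rfl
  | cons k t ih =>
    rcases List.pairwise_cons.1 hl with ⟨hk, ht⟩
    by_cases hcase : v ≤ hg k
    · rw [rcPop, if_pos hcase, ih ht, List.filter_cons]
      simp [not_lt.2 hcase]
    · rw [not_le] at hcase
      rw [rcPop, if_neg (not_le.2 hcase), List.filter_cons]
      simp only [hcase, decide_true, if_true]
      rw [List.filter_eq_self.2 (fun b hb => by
        simpa using lt_trans (hk b hb) hcase)]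

theorem stk_succ (hg : Nat → Int) (i : Nat) :
    stk hg (i + 1) = i :: (stk hg i).filter (fun k => decide (hg k < hg i)) := by
  unfold stk
  rw [List.filter_reverse, List.filter_filter, List.range_succ, List.filter_append]
  have h1 : List.filter (fun k => decide (∀ m, m < i + 1 → k < m → hg k < hg m)) [i] = [i] :=
    List.filter_eq_self.2 (fun b hb => by
      rw [List.mem_singleton] at hb
      subst hb
      rw [decide_eq_true_eq]
      intro m hm1 hm2
      omega)
  rw [h1, List.reverse_append, List.reverse_singleton, List.singleton_append]
  congr 2
  apply List.filter_congr
  intro k hk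
  rw [List.mem_range] at hk
  rw [← Bool.decide_and, decide_eq_decide]
  constructor
  · intro h
    exact ⟨h i (by omega) hk, fun m hm hkm => h m (by omega) hkm⟩
  · rintro ⟨hki, h⟩ m hm hkm
    rcases Nat.lt_succ_iff_lt_or_eq.1 hm with hm' | rfl
    · exact h m hm' hkm
    · exact hki

-- if no stack element (k < i with the "visible" property) has hg k < v, then nothing below i does
theorem all_ge_of_no_small (hg : Nat → Int) (v : Int) (i : Nat)
    (h : ∀ k, k < i → (∀ m, m < i → k < m → hg k < hg m) → v ≤ hg k) :
    ∀ m, m < i → v ≤ hg m := by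
  suffices H : ∀ d m, i - m ≤ d → m < i → v ≤ hg m by
    intro m hm; exact H i m (by omega) hm
  intro d
  induction d with
  | zero => intro m h1 h2; omega
  | succ d ih =>
    intro m _ hmi
    by_cases hP : ∀ m', m' < i → m < m' → hg m < hg m'
    · exact h m hmi hP
    · push Not at hP
      rcases hP with ⟨m', hm'i, hmm', hle⟩
      exact le_trans (ih m' (by omega) hm'i) hle

-- every index strictly between the post-pop stack top L and i has height ≥ hg i
theorem max_prop (hg : Nat → Int) (i L : Nat) (rest : List Nat)
    (hfil : (stk hg i).filter (fun k => decide (hg k < hg i)) = L :: rest) :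
    ∀ m, L < m → m < i → hg i ≤ hg m := by
  have hmem : ∀ k, k ∈ L :: rest ↔ k ∈ stk hg i ∧ hg k < hg i := by
    intro k; rw [← hfil]; simp [List.mem_filter]
  have hpw : (L :: rest).Pairwise (· > ·) := by
    rw [← hfil]; exact (stk_pairwise_gt hg i).filter _
  suffices H : ∀ d m, i - m ≤ d → L < m → m < i → hg i ≤ hg m by
    intro m h1 h2; exact H i m (by omega) h1 h2
  intro d
  induction d with
  | zero => intro m h1 h2 h3; omega
  | succ d ih =>
    intro m _ hLm hmi
    by_contra hlt'
    have hlt := not_le.1 hlt'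
    have hP : ∀ m', m' < i → m < m' → hg m < hg m' := fun m' hm'i hmm' =>
      lt_of_lt_of_le hlt (ih m' (by omega) (by omega) hm'i)
    have hm : m ∈ L :: rest := (hmem m).2 ⟨(mem_stk hg).2 ⟨hmi, hP⟩, hlt⟩
    rcases List.mem_cons.1 hm with hm' | hm'
    · omega
    · have := List.rel_of_pairwise_cons hpw hm'
      omega

-- windows entirely inside a region of height ≥ hg i have min hg i
theorem rmin_const (hg : Nat → Int) (i lo : Nat)
    (hbd : ∀ m, lo ≤ m → m < i → hg i ≤ hg m) :
    ∀ j, lo ≤ j → j ≤ i → rmin hg i j = hg i := by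
  suffices H : ∀ d j, i - j ≤ d → lo ≤ j → j ≤ i → rmin hg i j = hg i by
    intro j h1 h2; exact H i j (by omega) h1 h2
  intro d
  induction d with
  | zero =>
    intro j hd _ hji
    rw [show j = i by omega]; exact rmin_self hg i
  | succ d ih =>
    intro j hd hlo hji
    rcases Nat.eq_or_lt_of_le hji with heq | hlt
    · rw [heq]; exact rmin_self hg i
    · rw [rmin_lt hg hlt, ih (j + 1) (by omega) (by omega) (by omega)]
      exact min_eq_right (hbd j hlo hlt)

-- windows reaching into the region left of the strictly smaller L shrink to windows ending at L
theorem rmin_cut (hg : Nat → Int) (i L : Nat) (hLi : L < i) (hLv : hg L < hg i)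
    (hbd : ∀ m, L + 1 ≤ m → m < i → hg i ≤ hg m) :
    ∀ j, j ≤ L → rmin hg i j = rmin hg L j := by
  suffices H : ∀ d j, L - j ≤ d → j ≤ L → rmin hg i j = rmin hg L j by
    intro j h1; exact H L j (by omega) h1
  intro d
  induction d with
  | zero =>
    intro j _ h2
    rw [show j = L by omega, rmin_lt hg hLi, rmin_self,
      rmin_const hg i (L + 1) hbd (L + 1) (le_refl _) hLi,
      min_eq_left (le_of_lt hLv)]
  | succ d ih =>
    intro j hd hjL
    rcases Nat.eq_or_lt_of_le hjL with rfl | hlt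
    · exact ih j (by omega) hjL
    · rw [rmin_lt hg (by omega), rmin_lt hg hlt, ih (j + 1) (by omega) (by omega)]

theorem sfun_const (hg : Nat → Int) (i : Nat)
    (hbd : ∀ m, m < i → hg i ≤ hg m) :
    Sfun hg i = hg i * ((i : Int) + 1) := by
  unfold Sfun
  have hmap : (List.range (i + 1)).map (rmin hg i)
      = (List.range (i + 1)).map (fun _ => hg i) := by
    apply List.map_congr_left
    intro j hj
    rw [List.mem_range] at hj
    exact rmin_const hg i 0 (fun m _ hm => hbd m hm) j (Nat.zero_le _) (by omega)
  rw [hmap, List.map_const', List.sum_replicate, List.length_range, nsmul_eq_mul]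
  push_cast
  ring

theorem sfun_rec (hg : Nat → Int) (i L : Nat) (hLi : L < i) (hLv : hg L < hg i)
    (hbd : ∀ m, L + 1 ≤ m → m < i → hg i ≤ hg m) :
    Sfun hg i = Sfun hg L + hg i * ((i : Int) - (L : Int)) := by
  unfold Sfun
  have hsplit : List.range (i + 1) = List.range (L + 1) ++ List.range' (L + 1) (i - L) := by
    have h : List.range' 0 (L + 1) 1 ++ List.range' (0 + 1 * (L + 1)) (i - L) 1
        = List.range' 0 ((L + 1) + (i - L)) 1 := List.range'_append
    rw [show 0 + 1 * (L + 1) = L + 1 by omega, show L + 1 + (i - L) = i + 1 by omega] at h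
    rw [List.range_eq_range', List.range_eq_range', ← h]
  rw [hsplit, List.map_append, List.sum_append]
  congr 1
  · apply congrArg
    apply List.map_congr_left
    intro j hj
    rw [List.mem_range] at hj
    exact rmin_cut hg i L hLi hLv hbd j (by omega)
  · have hmap : (List.range' (L + 1) (i - L)).map (rmin hg i)
        = (List.range' (L + 1) (i - L)).map (fun _ => hg i) := by
      apply List.map_congr_left
      intro j hj
      rw [List.mem_range'_1] at hj
      exact rmin_const hg i (L + 1) hbd j (by omega) (by omega)
    rw [hmap, List.map_const', List.sum_replicate, List.length_range', nsmul_eq_mul]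
    push_cast [Nat.cast_sub (le_of_lt hLi)]
    ring

-- value of B's inner loop
theorem inner_eq (hg : Nat → Int) :
    ∀ (k : Nat) (t m : Int),
      ((List.range k).reverse.foldl
        (fun (p : Int × Int) j =>
          let m := min p.2 (hg j)
          (p.1 + m, m))
        (t, m)) =
      (t + ((List.range k).map (fun j => wmin hg m j k)).sum, wmin hg m 0 k) := by
  intro k
  induction k with
  | zero => intro t m; simp [wmin]
  | succ k ih =>
    intro t m
    rw [List.range_succ, List.reverse_append]
    simp only [List.reverse_singleton, List.singleton_append, List.foldl_cons]
    rw [ih]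
    have hsn : ∀ j, j ≤ k → wmin hg m j (k + 1) = wmin hg (min m (hg k)) j k :=
      fun j hj => wmin_snoc hg m hj
    have hmap : (List.range k).map (fun j => wmin hg m j (k + 1))
        = (List.range k).map (fun j => wmin hg (min m (hg k)) j k) := by
      apply List.map_congr_left
      intro j hj
      rw [List.mem_range] at hj
      exact hsn j (by omega)
    have hlast : wmin hg m k (k + 1) = min m (hg k) := by
      rw [hsn k (le_refl _)]; simp [wmin]
    refine Prod.ext ?_ ?_
    · show t + min m (hg k) + ((List.range k).map (fun j => wmin hg (min m (hg k)) j k)).sum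
          = t + ((List.range k ++ [k]).map (fun j => wmin hg m j (k + 1))).sum
      rw [List.map_append, List.sum_append, hmap]
      simp only [List.map_cons, List.map_nil, List.sum_cons, List.sum_nil, hlast]
      ring
    · exact (hsn 0 (Nat.zero_le _)).symm

theorem alt_eq_sum (hghs : List Int) :
    rowcount_alt hghs =
      ((List.range hghs.length).map (Sfun (fun k => hghs.getD k 0))).sum := by
  set hg : Nat → Int := fun k => hghs.getD k 0 with hhg
  suffices H : ∀ n (t : Int),
      (List.range n).foldl
        (fun total i =>
          let mn := hg i
          (((List.range i).reverse).foldl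
            (fun (p : Int × Int) j =>
              let m := min p.2 (hg j)
              (p.1 + m, m))
            (total + mn, mn)).1)
        t = t + ((List.range n).map (Sfun hg)).sum by
    have := H hghs.length 0
    simpa [rowcount_alt, hhg] using this
  intro n
  induction n with
  | zero => intro t; simp
  | succ n ih =>
    intro t
    rw [List.range_succ, List.foldl_append, List.foldl_cons, List.foldl_nil, ih]
    simp only [inner_eq hg n]
    rw [List.map_append, List.sum_append]
    simp only [List.map_cons, List.map_nil, List.sum_cons, List.sum_nil]
    have hS : Sfun hg n = ((List.range n).map (fun j => wmin hg (hg n) j n)).sum + hg n := by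
      unfold Sfun
      rw [List.range_succ, List.map_append, List.sum_append]
      have h1 : (List.range n).map (rmin hg n) = (List.range n).map (fun j => wmin hg (hg n) j n) :=
        List.map_congr_left (fun j _ => rfl)
      rw [h1]
      simp [rmin_self]
    rw [hS]
    ring

theorem getD_map_range {f : Nat → Int} {i L : Nat} (h : L < i) :
    ((List.range i).map f).getD L 0 = f L := by
  rw [List.getD_eq_getElem?_getD, List.getElem?_map, List.getElem?_range h]
  rfl

-- A's loop invariant: after i steps the state is the closed-form stack plus the table of Sfun values
theorem a_inv (hg : Nat → Int) :
    ∀ i, (List.range i).foldl (rcStep hg) ([], []) = (stk hg i, (List.range i).map (Sfun hg)) := by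
  intro i
  induction i with
  | zero => simp [stk]
  | succ i ih =>
    rw [List.range_succ, List.foldl_append, List.foldl_cons, List.foldl_nil, ih]
    have hpop : rcPop hg (hg i) (stk hg i)
        = (stk hg i).filter (fun k => decide (hg k < hg i)) :=
      pop_eq_filter hg (hg i) (stk hg i) (stk_pairwise_hg hg i)
    unfold rcStep
    simp only [hpop]
    rw [← stk_succ hg i]
    congr 1
    rcases hfil : (stk hg i).filter (fun k => decide (hg k < hg i)) with _ | ⟨L, rest⟩
    · simp only [List.map_append, List.map_cons, List.map_nil]
      congr 1
      have hbd : ∀ m, m < i → hg i ≤ hg m := by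
        apply all_ge_of_no_small
        intro k hk hP
        by_contra hlt'
        have hlt := not_le.1 hlt'
        have : k ∈ (stk hg i).filter (fun k => decide (hg k < hg i)) := by
          simp only [List.mem_filter, decide_eq_true_eq]
          exact ⟨(mem_stk hg).2 ⟨hk, fun m hm hkm => hP m hm hkm⟩, hlt⟩
        rw [hfil] at this
        exact absurd this (List.not_mem_nil)
      rw [sfun_const hg i hbd]
    · simp only [List.map_append, List.map_cons, List.map_nil]
      congr 1
      have hLmem : L ∈ (stk hg i).filter (fun k => decide (hg k < hg i)) := by
        rw [hfil]; exact List.mem_cons_self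
      rw [List.mem_filter] at hLmem
      rcases hLmem with ⟨hLstk, hLv⟩
      rw [decide_eq_true_eq] at hLv
      rcases (mem_stk hg).1 hLstk with ⟨hLi, _⟩
      have hbd := max_prop hg i L rest hfil
      rw [getD_map_range hLi, sfun_rec hg i L hLi hLv (fun m h1 h2 => hbd m (by omega) h2)]

theorem a_eq_sum (hghs : List Int) :
    rowcount hghs = ((List.range hghs.length).map (Sfun (fun k => hghs.getD k 0))).sum := by
  unfold rowcount
  rw [a_inv]

-- ===== VERDICT (by name: the statement is the Claim_ definition above) =====
theorem rowcount_spec : Claim_equal_rowcount := by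
  intro hghs _
  unfold Spec_rowcount
  rw [a_eq_sum, alt_eq_sum]
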